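-- pv_equiv track=rewrite | github.com/bug400/capasm | capasm/capcommon.py | parseBCD
-- ===== SOURCE A (Python) =====
-- def parseBCD(string):
--    retVal=0
--    for c in string:
--       if c in "0123456789":
--          retVal=(retVal<<4) | ord(c)-ord("0")
--       else:
--          return None
--    return retVal
-- ===== SOURCE B (Python) =====
-- def parseBCD(string):
--    # Validate first, then convert in closed form: a BCD-packed decimal digit
--    # string equals the value of the same digits read as hexadecimal.
--    if all(c in "0123456789" for c in string):
--       return int(string, 16) if string else 0
--    return None
-- ===== Notes on version B (the rewrite author's own statement) =====
-- stated objective: simpler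
-- what changed: A fuses validation and bit-shift/or accumulation in one loop; B first validates that every character is a decimal digit and then converts the whole string in closed form as a base-16 integer (int(string,16)), since BCD packing of decimal digits equals their hexadecimal reading.
import Mathlib
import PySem

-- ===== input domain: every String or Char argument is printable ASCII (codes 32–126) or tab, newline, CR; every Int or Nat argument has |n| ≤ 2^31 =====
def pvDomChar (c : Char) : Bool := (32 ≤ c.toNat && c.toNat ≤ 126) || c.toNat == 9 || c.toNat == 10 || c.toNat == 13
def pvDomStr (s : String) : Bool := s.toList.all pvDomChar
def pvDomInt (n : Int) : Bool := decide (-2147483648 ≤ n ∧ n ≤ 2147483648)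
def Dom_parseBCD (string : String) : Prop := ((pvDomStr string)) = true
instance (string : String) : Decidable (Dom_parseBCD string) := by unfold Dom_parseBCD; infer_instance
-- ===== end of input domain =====

-- B replaces A's fused shift-and-or accumulation loop by validate-all-digits
-- then a closed-form base-16 conversion of the whole string (objective: simpler).


-- ===== PORT A =====
-- `c in "0123456789"` for a single char = membership in these ten chars
def pvDigits : List Char := ['0','1','2','3','4','5','6','7','8','9']

-- the loop `for c in string: if c in "0123456789": retVal=(retVal<<4) | ord(c)-ord("0") else: return None`
def parseBCDLoop (retVal : Int) : List Char → Option Int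
  | [] => some retVal
  | c :: cs =>
    if pvDigits.contains c then
      parseBCDLoop (PySem.Int.bor (retVal <<< (4 : Nat)) ((c.toNat : Int) - 48)) cs
    else none

def parseBCD (string : String) : Option Int := parseBCDLoop 0 string.toList

-- ===== PORT B =====
def parseBCD_alt (string : String) : Option Int :=
  if string.toList.all (fun c => pvDigits.contains c) then
    -- int(string, 16) on an all-decimal-digit string is its base-16 positional
    -- value (ported as that contract); the empty string takes the fold's 0 too,
    -- matching Source B's `if string else 0`.
    some (string.toList.foldl (fun a c => 16 * a + ((c.toNat : Int) - 48)) 0)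
  else none

-- ===== PRECONDITION & SPEC =====
def Spec_parseBCD (string : String) (out : Option Int) : Prop := out = parseBCD_alt string
instance (string : String) (out : Option Int) : Decidable (Spec_parseBCD string out) := by unfold Spec_parseBCD; infer_instance

-- ===== CLAIM (what is proved, stated in full; the proofs are below) =====
def Claim_equal_parseBCD : Prop := ∀ (string : String), Dom_parseBCD string → Spec_parseBCD string (parseBCD string)

-- ===== LEMMAS AND PROOFS =====

theorem pv_shift_or_eq (r : Int) (hr : 0 ≤ r) (d : Nat) (hd : d < 16) :
    PySem.Int.bor (r <<< (4 : Nat)) ((d : Int)) = 16 * r + (d : Int) := by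
  obtain ⟨n, rfl⟩ := Int.eq_ofNat_of_zero_le hr
  have h1 : ((n : Int) <<< (4 : Nat)) = ((n <<< 4 : Nat) : Int) := by
    simp [Int.shiftLeft_eq, Nat.shiftLeft_eq]
  rw [h1, PySem.Int.bor_natCast]
  rw [← Nat.shiftLeft_add_eq_or_of_lt (by omega : d < 2 ^ 4), Nat.shiftLeft_eq]
  push_cast; ring

theorem pv_digit_bounds {c : Char} (h : pvDigits.contains c = true) :
    48 ≤ c.toNat ∧ c.toNat ≤ 57 := by
  simp only [pvDigits, List.contains_eq_mem, decide_eq_true_eq, List.mem_cons, List.not_mem_nil, or_false] at h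
  rcases h with rfl | rfl | rfl | rfl | rfl | rfl | rfl | rfl | rfl | rfl <;> exact ⟨by decide, by decide⟩

theorem pv_loop_eq (cs : List Char) : ∀ (r : Int), 0 ≤ r →
    parseBCDLoop r cs =
      if cs.all (fun c => pvDigits.contains c) then
        some (cs.foldl (fun a c => 16 * a + ((c.toNat : Int) - 48)) r)
      else none := by
  induction cs with
  | nil => intro r _; simp [parseBCDLoop]
  | cons c cs ih =>
    intro r hr
    by_cases hc : pvDigits.contains c = true
    · obtain ⟨h48, h57⟩ := pv_digit_bounds hc
      have hd : ((c.toNat : Int) - 48) = ((c.toNat - 48 : Nat) : Int) := by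
        push_cast [h48]; ring
      have hstep : PySem.Int.bor (r <<< (4 : Nat)) ((c.toNat : Int) - 48)
          = 16 * r + ((c.toNat : Int) - 48) := by
        rw [hd, pv_shift_or_eq r hr (c.toNat - 48) (by omega)]
      have hnn : 0 ≤ 16 * r + ((c.toNat : Int) - 48) := by
        have : (48 : Int) ≤ (c.toNat : Int) := by exact_mod_cast h48
        nlinarith
      simp only [parseBCDLoop, hc, if_true, hstep, List.all_cons, List.foldl_cons]
      exact ih _ hnn
    · simp only [parseBCDLoop]
      rw [if_neg hc, List.all_cons, if_neg]
      intro h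
      exact hc ((Bool.and_eq_true _ _).mp h).1

-- ===== VERDICT (by name: the statement is the Claim_ definition above) =====
theorem parseBCD_spec : Claim_equal_parseBCD := by
  intro s _
  unfold Spec_parseBCD parseBCD parseBCD_alt
  rw [pv_loop_eq s.toList 0 le_rfl]
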